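-- pv_equiv track=rewrite | github.com/NElsaesser/IPA-To-Speech | IPA2diphones/IPAtoSAMPA.py | create_diphones
-- ===== SOURCE A (Python) =====
-- def get_betonte_vokale():
--     betonte_vokale = ["aI", "OY", "aU", "a:~", "a:", "a", "e:", "EI", "E:~", "E:", "E", "i:", "I", "o:~",
--                       "o:", "O", "2:", "9", "y:", "Y", "u:", "@U", "U"]
--     return betonte_vokale
--
-- def create_diphones(phon_liste):
--     betonte_vokale = get_betonte_vokale()
--     diphones = []
--
--     '''
--         Falls der String ein Betonungszeichen enthält,
--         wird das Betonungszeichen dem nächsten Vokal,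
--         der theoretisch betont vorkommen kann, zugewiesen.
--         Wird kein solcher Vokal gefunden, verfällt das Betonungszeichen.
--     '''
--
--     i = 0
--     temp = phon_liste.copy()
--
--     for element_a in phon_liste:
--         if element_a == "\"":
--             index_elemb = i
--             for element_b in temp[i:]:
--                 if element_b in betonte_vokale:
--                     new_elem = "\"" + element_b
--                     temp.pop(index_elemb)
--                     temp.insert(index_elemb, new_elem)
--                     break
--                 index_elemb += 1
--             temp.pop(i)
--             i -= 1
--
--         i += 1
--
--     '''
--         Diphone werden als geschachtelte Arrays ausgegeben.
--     '''
--
--     for i in range(len(temp)-1):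
--         dip = [temp[i], temp[i + 1]]
--         diphones.append(dip)
--         i += 1
--
--     return diphones
-- ===== SOURCE B (Python) =====
-- VOWELS = frozenset(["aI", "OY", "aU", "a:~", "a:", "a", "e:", "EI", "E:~", "E:", "E", "i:", "I", "o:~",
--                     "o:", "O", "2:", "9", "y:", "Y", "u:", "@U", "U"])
--
-- def create_diphones(phon_liste):
--     out = []
--     pending = 0
--     for x in phon_liste:
--         if x == '"':
--             pending += 1
--         elif pending and x in VOWELS:
--             out.append('"' + x)
--             pending -= 1
--         else:
--             out.append(x)
--     return [[a, b] for a, b in zip(out, out[1:])]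
-- ===== Notes on version B (the rewrite author's own statement) =====
-- stated objective: simpler
-- what changed: A re-scans the list forward and splices it (pop/insert) for every stress mark before pairing; B makes a single forward pass carrying a pending-stress counter and a vowel set, then zips the result with its tail.
import Mathlib
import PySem

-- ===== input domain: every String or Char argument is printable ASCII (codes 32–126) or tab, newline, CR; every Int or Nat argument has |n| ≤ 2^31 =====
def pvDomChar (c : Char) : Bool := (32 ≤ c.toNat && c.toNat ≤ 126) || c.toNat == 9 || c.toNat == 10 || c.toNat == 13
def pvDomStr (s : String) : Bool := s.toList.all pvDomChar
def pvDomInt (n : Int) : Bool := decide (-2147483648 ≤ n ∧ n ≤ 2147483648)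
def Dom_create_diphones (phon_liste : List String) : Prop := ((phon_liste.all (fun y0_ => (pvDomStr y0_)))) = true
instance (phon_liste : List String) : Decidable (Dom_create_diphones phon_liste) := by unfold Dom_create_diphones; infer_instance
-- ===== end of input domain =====

-- B replaces A's per-stress-mark forward scan and list splicing by a single forward pass with a
-- pending-stress counter and a vowel set; the return value is identical on every input.

-- ===== PORT A =====
def getBetonteVokale : List String :=
  ["aI", "OY", "aU", "a:~", "a:", "a", "e:", "EI", "E:~", "E:", "E", "i:", "I", "o:~",
   "o:", "O", "2:", "9", "y:", "Y", "u:", "@U", "U"]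

-- the inner 'for element_b in temp[i:]' loop: returns index_elemb and element_b at the break,
-- or none if the loop finishes without a break
def findVowelA : List String → Nat → Option (Nat × String)
  | [], _ => none
  | b :: rest, idx =>
      if b ∈ getBetonteVokale then some (idx, b) else findVowelA rest (idx + 1)

-- one iteration of the outer 'for element_a in phon_liste' loop on the state (i, temp).
-- temp.pop(j); temp.insert(j, new_elem) and temp.pop(i) are written as take/drop splices, exact
-- because A's indices are always in range (j is the position of an element found in temp, and i
-- is a live position of temp); i is a Nat since Python's i is only transiently -1
-- (the 'i -= 1' is immediately followed by the loop's 'i += 1', folded into this step).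
def stepA (st : Nat × List String) (element_a : String) : Nat × List String :=
  let i := st.1
  let temp := st.2
  if element_a = "\"" then
    let temp' :=
      match findVowelA (temp.drop i) i with
      | some (j, b) => temp.take j ++ ["\"" ++ b] ++ temp.drop (j + 1)  -- pop j; insert j ('"'+b); break
      | none => temp
    let temp'' := temp'.take i ++ temp'.drop (i + 1)                    -- temp.pop(i)
    (i, temp'')
  else (i + 1, temp)

def create_diphones (phon_liste : List String) : List (List String) :=
  let temp := (phon_liste.foldl stepA (0, phon_liste)).2
  -- for i in range(len(temp)-1): diphones.append([temp[i], temp[i+1]])   (its trailing 'i += 1' has no effect)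
  (PySem.List.pyRange 0 ((temp.length : Int) - 1) 1).foldl
    (fun diphones i => diphones ++ [[PySem.List.pyGetD temp i "", PySem.List.pyGetD temp (i + 1) ""]]) []

-- ===== PORT B =====
-- Source B's VOWELS frozenset
def vowelSet : PySem.Set String := PySem.Set.ofList getBetonteVokale

-- one iteration of Source B's single pass on the state (pending, out)
def stepB (st : Nat × List String) (x : String) : Nat × List String :=
  let pending := st.1
  let out := st.2
  if x = "\"" then (pending + 1, out)
  else if pending ≠ 0 ∧ PySem.Set.contains vowelSet x then (pending - 1, out ++ ["\"" ++ x])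
  else (pending, out ++ [x])

def create_diphones_alt (phon_liste : List String) : List (List String) :=
  let out := (phon_liste.foldl stepB (0, [])).2
  List.zipWith (fun a b => [a, b]) out out.tail

-- ===== PRECONDITION & SPEC =====
def Spec_create_diphones (phon_liste : List String) (out : List (List String)) : Prop := out = create_diphones_alt phon_liste
instance (phon_liste : List String) (out : List (List String)) : Decidable (Spec_create_diphones phon_liste out) := by unfold Spec_create_diphones; infer_instance

-- ===== CLAIM (what is proved, stated in full; the proofs are below) =====
def Claim_equal_create_diphones : Prop := ∀ (phon_liste : List String), Dom_create_diphones phon_liste → Spec_create_diphones phon_liste (create_diphones phon_liste)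

-- ===== LEMMAS AND PROOFS =====

-- 'markN p l' marks the first p stressable vowels of l with a leading '"'
def markN : Nat → List String → List String
  | 0, l => l
  | _ + 1, [] => []
  | p + 1, x :: l =>
      if x ∈ getBetonteVokale then ("\"" ++ x) :: markN p l
      else x :: markN (p + 1) l

theorem markN_nil (p : Nat) : markN p [] = [] := by cases p <;> simp [markN]

theorem markN_zero (l : List String) : markN 0 l = l := by simp [markN]

theorem markN_not_vowel (p : Nat) (x : String) (l : List String)
    (h : x ∉ getBetonteVokale) : markN p (x :: l) = x :: markN p l := by
  cases p with
  | zero => rw [markN_zero, markN_zero]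
  | succ q => simp [markN, h]

theorem markN_vowel (p : Nat) (x : String) (l : List String)
    (h : x ∈ getBetonteVokale) : markN (p + 1) (x :: l) = ("\"" ++ x) :: markN p l := by
  simp [markN, h]

theorem quote_not_vowel (x : String) : ("\"" ++ x) ∉ getBetonteVokale := by
  simp only [getBetonteVokale, List.mem_cons, List.not_mem_nil, or_false, not_or]
  refine ⟨?_,?_,?_,?_,?_,?_,?_,?_,?_,?_,?_,?_,?_,?_,?_,?_,?_,?_,?_,?_,?_,?_,?_⟩ <;>
    (intro h; have := congrArg String.toList h; simp at this)

theorem findVowelA_shift (l : List String) (i0 : Nat) :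
    findVowelA l i0 = (findVowelA l 0).map (fun jb => (jb.1 + i0, jb.2)) := by
  induction l generalizing i0 with
  | nil => rfl
  | cons b rest ih =>
      simp only [findVowelA]
      by_cases h : b ∈ getBetonteVokale
      · simp [h]
      · simp only [h, if_false]
        rw [ih (i0 + 1), ih 1]
        cases findVowelA rest 0 with
        | none => rfl
        | some jb => simp; omega

theorem findVowelA_markN_none (p : Nat) (l : List String)
    (h : findVowelA (markN p l) 0 = none) : markN (p + 1) l = markN p l := by
  induction l generalizing p with
  | nil => rw [markN_nil, markN_nil]
  | cons x l ih =>
      by_cases hv : x ∈ getBetonteVokale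
      · cases p with
        | zero => exfalso; rw [markN_zero] at h; simp [findVowelA, hv] at h
        | succ q =>
            rw [markN_vowel _ _ _ hv] at h
            rw [markN_vowel _ _ _ hv, markN_vowel _ _ _ hv]
            simp only [findVowelA, quote_not_vowel, if_false] at h
            rw [findVowelA_shift] at h
            cases heq : findVowelA (markN q l) 0 with
            | none => rw [ih q heq]
            | some jb => rw [heq] at h; simp at h
      · rw [markN_not_vowel _ _ _ hv, markN_not_vowel _ _ _ hv]
        rw [markN_not_vowel _ _ _ hv] at h
        simp only [findVowelA, hv, if_false] at h
        rw [findVowelA_shift] at h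
        cases heq : findVowelA (markN p l) 0 with
        | none => rw [ih p heq]
        | some jb => rw [heq] at h; simp at h

theorem findVowelA_markN_some (p : Nat) (l : List String) (jj : Nat) (bb : String)
    (h : findVowelA (markN p l) 0 = some (jj, bb)) :
    (markN p l).take jj ++ ["\"" ++ bb] ++ (markN p l).drop (jj + 1) = markN (p + 1) l := by
  induction l generalizing p jj bb with
  | nil => rw [markN_nil] at h; simp [findVowelA] at h
  | cons x l ih =>
      by_cases hv : x ∈ getBetonteVokale
      · cases p with
        | zero =>
            rw [markN_zero] at h ⊢
            simp only [findVowelA, hv, if_pos, Option.some.injEq, Prod.mk.injEq] at h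
            obtain ⟨hj, hb⟩ := h
            subst hj; subst hb
            rw [markN_vowel _ _ _ hv, markN_zero]
            rfl
        | succ q =>
            rw [markN_vowel _ _ _ hv] at h ⊢
            simp only [findVowelA, quote_not_vowel, if_false] at h
            rw [findVowelA_shift] at h
            cases heq : findVowelA (markN q l) 0 with
            | none => rw [heq] at h; simp at h
            | some jb =>
                rw [heq] at h
                simp only [Option.map_some, Option.some.injEq, Prod.mk.injEq] at h
                obtain ⟨hj, hb⟩ := h
                subst hb
                have hs := ih q jb.1 jb.2 (by rw [heq])
                rw [← hj]
                simp only [List.take_succ_cons, List.drop_succ_cons, List.cons_append]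
                rw [markN_vowel _ _ _ hv]
                rw [show jb.1 + 0 + 1 = jb.1 + 1 from by omega]
                exact congrArg (("\"" ++ x) :: ·) hs
      · rw [markN_not_vowel _ _ _ hv] at h ⊢
        rw [markN_not_vowel _ _ _ hv]
        simp only [findVowelA, hv, if_false] at h
        rw [findVowelA_shift] at h
        cases heq : findVowelA (markN p l) 0 with
        | none => rw [heq] at h; simp at h
        | some jb =>
            rw [heq] at h
            simp only [Option.map_some, Option.some.injEq, Prod.mk.injEq] at h
            obtain ⟨hj, hb⟩ := h
            subst hb
            have hs := ih p jb.1 jb.2 (by rw [heq])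
            rw [← hj]
            simp only [List.take_succ_cons, List.drop_succ_cons, List.cons_append]
            rw [show jb.1 + 0 + 1 = jb.1 + 1 from by omega]
            exact congrArg (x :: ·) hs

-- the effect of one '"'-step of A on the invariant shape
theorem stepA_quote (acc l : List String) (p : Nat) :
    stepA (acc.length, acc ++ "\"" :: markN p l) "\"" = (acc.length, acc ++ markN (p + 1) l) := by
  have hnq : ("\"" : String) ∉ getBetonteVokale := by decide
  have h1 : ∀ w : List String, (acc ++ "\"" :: w).take acc.length = acc := fun w => by
    simpa using List.take_length_add_append (l₁ := acc) (l₂ := "\"" :: w) 0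
  have h2 : ∀ w : List String, (acc ++ "\"" :: w).drop (acc.length + 1) = w := fun w => by
    simpa using List.drop_length_add_append (l₁ := acc) (l₂ := "\"" :: w) 1
  have hdrop : (acc ++ "\"" :: markN p l).drop acc.length = "\"" :: markN p l := by
    simpa using List.drop_length_add_append (l₁ := acc) (l₂ := "\"" :: markN p l) 0
  simp only [stepA, hdrop]
  rw [show findVowelA ("\"" :: markN p l) acc.length =
        findVowelA (markN p l) (acc.length + 1) from by simp [findVowelA, hnq]]
  rw [findVowelA_shift]
  cases heq : findVowelA (markN p l) 0 with
  | none =>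
      simp only [Option.map_none]
      rw [findVowelA_markN_none p l heq, h1, h2]
      simp
  | some jb =>
      simp only [Option.map_some]
      have hj : jb.1 + (acc.length + 1) = acc.length + (1 + jb.1) := by omega
      rw [hj, List.take_length_add_append (l₁ := acc) (l₂ := "\"" :: markN p l) (1 + jb.1)]
      have hd : acc.length + (1 + jb.1) + 1 = acc.length + (1 + (jb.1 + 1)) := by omega
      rw [hd, List.drop_length_add_append (l₁ := acc) (l₂ := "\"" :: markN p l) (1 + (jb.1 + 1))]
      have htake : ("\"" :: markN p l).take (1 + jb.1) = "\"" :: (markN p l).take jb.1 := by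
        rw [Nat.add_comm]; rfl
      have hdrop2 : ("\"" :: markN p l).drop (1 + (jb.1 + 1)) = (markN p l).drop (jb.1 + 1) := by
        rw [Nat.add_comm]; rfl
      rw [htake, hdrop2]
      have hsplice := findVowelA_markN_some p l jb.1 jb.2 (by rw [heq])
      have E : acc ++ ("\"" :: (markN p l).take jb.1 ++ ["\"" ++ jb.2]) ++ (markN p l).drop (jb.1 + 1)
             = acc ++ "\"" :: markN (p + 1) l := by
        have := congrArg (fun w => acc ++ "\"" :: w) hsplice
        simpa [List.append_assoc] using this
      simp only [List.append_assoc] at E ⊢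
      rw [show ("\"" :: (markN p l).take jb.1) ++ (["\"" ++ jb.2] ++ (markN p l).drop (jb.1 + 1))
            = "\"" :: ((markN p l).take jb.1 ++ (["\"" ++ jb.2] ++ (markN p l).drop (jb.1 + 1))) from rfl] at E ⊢
      rw [show acc ++ "\"" :: ((markN p l).take jb.1 ++ (["\"" ++ jb.2] ++ (markN p l).drop (jb.1 + 1)))
            = acc ++ "\"" :: markN (p + 1) l from by simpa [List.append_assoc] using E]
      rw [h1, h2]
      simp

theorem vowelSet_eq : vowelSet = getBetonteVokale := by decide

-- main invariant: A's fold over the remaining elements, started on the invariant shape,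
-- produces the same final list as B's fold
theorem foldA_eq_foldB (rest : List String) (acc : List String) (p : Nat) :
    (rest.foldl stepA (acc.length, acc ++ markN p rest)).2 = (rest.foldl stepB (p, acc)).2 := by
  induction rest generalizing acc p with
  | nil => simp [markN_nil]
  | cons x rest ih =>
      rw [List.foldl_cons, List.foldl_cons]
      by_cases hq : x = "\""
      · subst hq
        have hnq : ("\"" : String) ∉ getBetonteVokale := by decide
        rw [markN_not_vowel _ _ _ hnq, stepA_quote]
        rw [show stepB (p, acc) "\"" = (p + 1, acc) from by simp [stepB]]
        exact ih acc (p + 1)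
      · have hstepA : ∀ w : List String, stepA (acc.length, acc ++ w) x = (acc.length + 1, acc ++ w) :=
          fun w => by simp [stepA, hq]
        by_cases hv : x ∈ getBetonteVokale
        · cases p with
          | zero =>
              rw [markN_zero, hstepA]
              rw [show stepB (0, acc) x = (0, acc ++ [x]) from by simp [stepB, hq]]
              have := ih (acc ++ [x]) 0
              rw [markN_zero] at this
              simpa using this
          | succ q =>
              rw [markN_vowel _ _ _ hv, hstepA]
              rw [show stepB (q + 1, acc) x = (q, acc ++ ["\"" ++ x]) from by
                simp [stepB, hq, vowelSet_eq, hv]]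
              have := ih (acc ++ ["\"" ++ x]) q
              simpa using this
        · rw [markN_not_vowel _ _ _ hv, hstepA]
          rw [show stepB (p, acc) x = (p, acc ++ [x]) from by
            simp [stepB, hq, vowelSet_eq, hv]]
          have := ih (acc ++ [x]) p
          simpa using this

-- the pair loop over indices equals zipWith of the list with its tail
theorem window_map_eq_zipWith (t : List String) :
    (List.range (t.length - 1)).map (fun k => [t.getD k "", t.getD (k + 1) ""])
      = List.zipWith (fun a b => [a, b]) t t.tail := by
  match t with
  | [] => rfl
  | [a] => rfl
  | a :: b :: t' =>
      have hlen : (a :: b :: t').length - 1 = t'.length + 1 := by simp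
      rw [hlen, List.range_succ_eq_map]
      simp only [List.map_cons, List.map_map]
      have ih := window_map_eq_zipWith (b :: t')
      simp only [List.length_cons, Nat.add_sub_cancel] at ih
      simp only [List.zipWith, List.tail_cons]
      refine congrArg₂ List.cons rfl ?_
      rw [List.tail_cons] at ih
      rw [← ih]
      apply List.map_congr_left
      intro k _
      simp [List.getD]

theorem pairsA_eq (t : List String) :
    (PySem.List.pyRange 0 ((t.length : Int) - 1) 1).foldl
      (fun diphones i => diphones ++ [[PySem.List.pyGetD t i "", PySem.List.pyGetD t (i + 1) ""]]) []
    = List.zipWith (fun a b => [a, b]) t t.tail := by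
  rw [PySem.List.foldl_append_singleton_eq_map]
  rw [PySem.List.pyRange_one]
  simp only [List.map_map]
  rw [← window_map_eq_zipWith t]
  have hn : ((t.length : Int) - 1 - 0).toNat = t.length - 1 := by omega
  rw [hn]
  apply List.map_congr_left
  intro k _
  simp only [Function.comp]
  have h1 : (0 : Int) + (k : Int) = ((k : Nat) : Int) := by omega
  rw [h1, PySem.List.pyGetD_natCast]
  have h2 : ((k : Nat) : Int) + 1 = (((k + 1 : Nat)) : Int) := by push_cast; ring
  rw [h2, PySem.List.pyGetD_natCast]

-- ===== VERDICT (by name: the statement is the Claim_ definition above) =====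
theorem create_diphones_spec : Claim_equal_create_diphones := by
  intro phon_liste _
  unfold Spec_create_diphones create_diphones create_diphones_alt
  have hA := foldA_eq_foldB phon_liste [] 0
  rw [markN_zero] at hA
  simp only [List.length_nil, List.nil_append] at hA
  rw [hA, pairsA_eq]
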